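-- pv_equiv track=rewrite | github.com/friaes/FP | Projeto1/Projeto1_Rodrigo_Friaes.py | validar_cifra
-- ===== SOURCE A (Python) =====
-- def validar_cifra(s1, s2):
--     ocorrencias = {}
--     ctrl = ''              # sequencia de controlo
--     for i in s1:           # contar numero de ocorrências de cada caracter excluindo '-'
--         if i != '-' and i not in ocorrencias:
--             ocorrencias[i] = 1
--         elif i in ocorrencias:
--             ocorrencias[i] += 1
--     for j in ocorrencias:  # comparar n.º de ocorrências entre caracteres da cifra
--         k = 0              # caracter da sequencia de controlo
--         while k < len(ocorrencias):
--             if len(ctrl) == 0:        # se nenhum caracter da cifra tiver sido adicionado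
--                 ctrl = j
--                 k = len(ocorrencias)  # avança para o próximo caracter da cifra
--             elif k == len(ctrl):      # se o caracter já tiver sido comparado com todos os caracteres
--                 ctrl += j             # da sequencia de controlo, este é o que tem menor n.º de ocorrencias
--                 k = len(ocorrencias)
--             elif ocorrencias[j] > ocorrencias[ctrl[k]]:   # se tiver mais ocorrencias que k é adicionado antes de k
--                 ctrl = ctrl[:k] + j + ctrl[k:]
--                 k = len(ocorrencias)
--             elif ocorrencias[j] == ocorrencias[ctrl[k]]:  # mesmo n.º de ocorrencias
--                 if j > ctrl[k]:                           # se não estiverem por ordem alfabética: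
--                     k += 1                                # avança para o próximo caracter da sequencia de controlo.
--                 else:
--                     ctrl = ctrl[:k] + j + ctrl[k:]        # se estiver por ordem alfabética o caracter é
--                     k = len(ocorrencias)                  # adicionado antes de k
--             elif ocorrencias[j] < ocorrencias[ctrl[k]]:   # se tiver menos ocorrencias que k
--                 k += 1                                    # avança para o próximo k
--     controlo = '[' + ctrl[:5] + ']'
--     if controlo == s2:
--         return True
--     return False
-- ===== SOURCE B (Python) =====
-- def validar_cifra(s1, s2):
--     counts = {}
--     for c in s1:                        # count every char except '-'
--         if c != '-':
--             counts[c] = counts.get(c, 0) + 1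
--     remaining = list(counts)
--     ctrl = ''
--     for _ in range(5):                  # pick the top five by (count desc, char asc)
--         if not remaining:
--             break
--         best = remaining[0]
--         for c in remaining[1:]:
--             if counts[c] > counts[best] or (counts[c] == counts[best] and c < best):
--                 best = c
--         ctrl += best
--         remaining.remove(best)
--     return '[' + ctrl + ']' == s2
-- ===== Notes on version B (the rewrite author's own statement) =====
-- stated objective: alternative
-- what changed: A insertion-sorts all distinct characters into a full frequency-ordered string and slices the first five; B counts with dict.get, then does at most five selection passes that each scan the remaining characters for the max-count (tie: alphabetically smaller) one and remove it, building only the top five.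
import Mathlib
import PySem

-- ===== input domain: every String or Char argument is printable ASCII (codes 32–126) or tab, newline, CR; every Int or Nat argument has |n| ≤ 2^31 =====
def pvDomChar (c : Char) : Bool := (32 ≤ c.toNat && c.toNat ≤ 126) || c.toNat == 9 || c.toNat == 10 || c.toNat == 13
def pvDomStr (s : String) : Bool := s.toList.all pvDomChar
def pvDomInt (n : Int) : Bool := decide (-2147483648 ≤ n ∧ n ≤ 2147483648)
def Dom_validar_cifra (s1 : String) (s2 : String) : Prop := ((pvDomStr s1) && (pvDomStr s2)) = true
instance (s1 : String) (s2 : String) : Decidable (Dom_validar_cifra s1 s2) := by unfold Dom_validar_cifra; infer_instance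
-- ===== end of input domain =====

-- B replaces A's quadratic insertion sort of all distinct characters by five selection
-- passes that pick only the top five (count desc, char asc); objective: alternative.

-- ===== PORT A =====

-- A's count loop: add new non-'-' chars with 1, increment chars already present.
def aCount (s1 : String) : PySem.Dict Char Int :=
  s1.toList.foldl
    (fun d i =>
      if i ≠ '-' ∧ ¬ (d.contains i = true) then d.insert i (1 : Int)
      else if d.contains i = true then d.modify i 0 (· + 1)
      else d)
    PySem.Dict.empty

-- A's inner `while k < len(ocorrencias)` loop for one cipher character j.
-- Branches in A's order; the branches that set k = len(ocorrencias) return.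
-- ctrl[k] is in range whenever this branch is reached in A (k ≤ len(ctrl) is
-- invariant), so the `none` fallback is dead code; the final `else` covers
-- `elif ocorrencias[j] < ocorrencias[ctrl[k]]`, the only case left by trichotomy.
def aInner (oc : PySem.Dict Char Int) (j : Char) (ctrl : List Char) (k : Nat) : List Char :=
  if _h : k < oc.size then
    if ctrl.length = 0 then [j]
    else if k = ctrl.length then ctrl ++ [j]
    else
      match ctrl[k]? with
      | none => ctrl
      | some c =>
        if oc.getD j 0 > oc.getD c 0 then ctrl.take k ++ j :: ctrl.drop k
        else if oc.getD j 0 = oc.getD c 0 then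
          if j > c then aInner oc j ctrl (k + 1)
          else ctrl.take k ++ j :: ctrl.drop k
        else aInner oc j ctrl (k + 1)
  else ctrl
termination_by oc.size - k

def validar_cifra (s1 : String) (s2 : String) : Bool :=
  let ocorrencias := aCount s1
  let ctrl := ocorrencias.keys.foldl (fun ctrl j => aInner ocorrencias j ctrl 0) []
  let controlo := String.ofList ('[' :: (ctrl.take 5 ++ [']']))
  if controlo == s2 then true else false

-- ===== PORT B =====

-- B's count loop: counts[c] = counts.get(c, 0) + 1 for every c except '-'.
def bCount (s1 : String) : PySem.Dict Char Int :=
  s1.toList.foldl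
    (fun d c => if c ≠ '-' then d.insert c (d.getD c 0 + 1) else d)
    PySem.Dict.empty

-- B's inner scan: `for c in remaining[1:]` keeping the best so far.
def bScan (oc : PySem.Dict Char Int) (best : Char) (rest : List Char) : Char :=
  rest.foldl
    (fun best c =>
      if oc.getD c 0 > oc.getD best 0 ∨ (oc.getD c 0 = oc.getD best 0 ∧ c < best) then c
      else best)
    best

-- B's `for _ in range(5)` selection loop; `remaining.remove(best)` is List.erase
-- (exact: best is always a member of remaining).
def bSel (oc : PySem.Dict Char Int) (remaining : List Char) : Nat → List Char
  | 0 => []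
  | n + 1 =>
    match remaining with
    | [] => []
    | b :: rest =>
      let best := bScan oc b rest
      best :: bSel oc ((b :: rest).erase best) n

def validar_cifra_alt (s1 : String) (s2 : String) : Bool :=
  let counts := bCount s1
  let ctrl := bSel counts counts.keys 5
  String.ofList ('[' :: (ctrl ++ [']'])) == s2

-- ===== PRECONDITION & SPEC =====
def Spec_validar_cifra (s1 : String) (s2 : String) (out : Bool) : Prop := out = validar_cifra_alt s1 s2
instance (s1 : String) (s2 : String) (out : Bool) : Decidable (Spec_validar_cifra s1 s2 out) := by unfold Spec_validar_cifra; infer_instance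

-- ===== CLAIM (what is proved, stated in full; the proofs are below) =====
def Claim_equal_validar_cifra : Prop := ∀ (s1 : String) (s2 : String), Dom_validar_cifra s1 s2 → Spec_validar_cifra s1 s2 (validar_cifra s1 s2)

-- ===== LEMMAS AND PROOFS =====

-- The strict order "j comes before c in the control string".
def R (oc : PySem.Dict Char Int) (j c : Char) : Prop :=
  oc.getD j 0 > oc.getD c 0 ∨ (oc.getD j 0 = oc.getD c 0 ∧ j < c)

lemma R_trans {oc : PySem.Dict Char Int} {a b c : Char} (h1 : R oc a b) (h2 : R oc b c) : R oc a c := by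
  unfold R at *
  rcases h1 with h1 | ⟨h1, h1'⟩ <;> rcases h2 with h2 | ⟨h2, h2'⟩
  · exact Or.inl (lt_trans h2 h1)
  · exact Or.inl (h2 ▸ h1)
  · exact Or.inl (h1 ▸ h2)
  · exact Or.inr ⟨h1.trans h2, lt_trans h1' h2'⟩

lemma R_total {oc : PySem.Dict Char Int} {a b : Char} (h : a ≠ b) : R oc a b ∨ R oc b a := by
  unfold R
  rcases lt_trichotomy (oc.getD a 0) (oc.getD b 0) with hlt | heq | hgt
  · exact Or.inr (Or.inl hlt)
  · rcases lt_or_gt_of_ne h with hc | hc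
    · exact Or.inl (Or.inr ⟨heq, hc⟩)
    · exact Or.inr (Or.inr ⟨heq.symm, hc⟩)
  · exact Or.inl (Or.inl hgt)

lemma R_asymm {oc : PySem.Dict Char Int} {a b : Char} (h1 : R oc a b) (h2 : R oc b a) : False := by
  unfold R at *
  rcases h1 with h1 | ⟨h1, h1'⟩ <;> rcases h2 with h2 | ⟨h2, h2'⟩ <;>
    first
      | exact absurd h1 (not_lt_of_gt h2)
      | exact absurd h1 (ne_of_gt h2).symm
      | exact absurd h2 (ne_of_gt h1).symm
      | exact absurd h1' (not_lt_of_gt h2')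

-- ---------- the two count loops build the same dict ----------

lemma count_step_eq (d : PySem.Dict Char Int) (c : Char) (hd : d.contains '-' = false) :
    (if c ≠ '-' ∧ ¬ (d.contains c = true) then d.insert c (1 : Int)
     else if d.contains c = true then d.modify c 0 (· + 1)
     else d)
      = (if c ≠ '-' then d.insert c (d.getD c 0 + 1) else d) := by
  by_cases hc : c = '-'
  · subst hc; simp [hd]
  · by_cases hm : d.contains c = true
    · simp [hc, hm, PySem.Dict.modify]
    · have hge : d.getD c 0 = 0 := by
        rw [PySem.Dict.getD_of_not_contains]; simp [hm]
      simp [hc, hm, hge]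

lemma count_fold_eq (l : List Char) :
    ∀ d : PySem.Dict Char Int, d.contains '-' = false →
      l.foldl (fun d i =>
          if i ≠ '-' ∧ ¬ (d.contains i = true) then d.insert i (1 : Int)
          else if d.contains i = true then d.modify i 0 (· + 1)
          else d) d
        = l.foldl (fun d c => if c ≠ '-' then d.insert c (d.getD c 0 + 1) else d) d := by
  induction l with
  | nil => intro d _; rfl
  | cons c t ih =>
    intro d hd
    simp only [List.foldl_cons, count_step_eq d c hd]
    apply ih
    by_cases hc : c = '-'
    · simpa [hc] using hd
    · simp [hc, PySem.Dict.contains_insert, hd, Ne.symm hc]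

lemma aCount_eq_bCount (s1 : String) : aCount s1 = bCount s1 :=
  count_fold_eq s1.toList PySem.Dict.empty (by simp)

lemma nodup_keys_bCount (s1 : String) : (bCount s1).keys.Nodup := by
  unfold bCount
  generalize s1.toList = l
  have h : ∀ d : PySem.Dict Char Int, d.keys.Nodup →
      (l.foldl (fun d c => if c ≠ '-' then d.insert c (d.getD c 0 + 1) else d) d).keys.Nodup := by
    induction l with
    | nil => intro d hd; exact hd
    | cons c t ih =>
      intro d hd
      simp only [List.foldl_cons]
      by_cases hc : c = '-'
      · simpa [hc] using ih d hd
      · simpa [hc] using ih _ (PySem.Dict.nodup_keys_insert _ _ _ hd)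
  exact h PySem.Dict.empty (by simp [PySem.Dict.keys_empty])

-- ---------- A's inner loop is a scan-insertion `ins` ----------

def ins (oc : PySem.Dict Char Int) (j : Char) : List Char → List Char
  | [] => [j]
  | c :: t =>
    if oc.getD j 0 > oc.getD c 0 then j :: c :: t
    else if oc.getD j 0 = oc.getD c 0 then
      if j > c then c :: ins oc j t else j :: c :: t
    else c :: ins oc j t

lemma length_ins (oc : PySem.Dict Char Int) (j : Char) (l : List Char) :
    (ins oc j l).length = l.length + 1 := by
  induction l with
  | nil => rfl
  | cons c t ih => unfold ins; split_ifs <;> simp [ih]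

lemma ins_perm (oc : PySem.Dict Char Int) (j : Char) (l : List Char) :
    (ins oc j l).Perm (j :: l) := by
  induction l with
  | nil => rfl
  | cons c t ih =>
    unfold ins
    split_ifs <;>
      first
        | rfl
        | exact ((ih.cons c).trans (List.Perm.swap j c t))

lemma mem_ins {oc : PySem.Dict Char Int} {j x : Char} {l : List Char} :
    x ∈ ins oc j l ↔ x = j ∨ x ∈ l := by
  rw [(ins_perm oc j l).mem_iff]; simp

lemma ins_pairwise {oc : PySem.Dict Char Int} {j : Char} {l : List Char}
    (hp : l.Pairwise (R oc)) (hne : ∀ c ∈ l, c ≠ j) : (ins oc j l).Pairwise (R oc) := by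
  induction l with
  | nil => simp [ins]
  | cons c t ih =>
    have hcj : c ≠ j := hne c (by simp)
    have hch := List.pairwise_cons.mp hp
    have hRcase : R oc j c ∨ R oc c j := R_total (Ne.symm hcj)
    have hbefore : (oc.getD j 0 > oc.getD c 0 ∨ (oc.getD j 0 = oc.getD c 0 ∧ ¬ j > c)) → R oc j c := by
      rintro (h | ⟨h, h'⟩)
      · exact Or.inl h
      · exact Or.inr ⟨h, lt_of_le_of_ne (not_lt.mp h') (Ne.symm hcj)⟩
    unfold ins
    split_ifs with h1 h2 h3
    · -- j inserted in front: R oc j x for all x ∈ c :: t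
      have hjc : R oc j c := Or.inl h1
      refine List.pairwise_cons.mpr ⟨?_, hp⟩
      rintro x hx
      rcases List.mem_cons.mp hx with rfl | hx
      · exact hjc
      · exact R_trans hjc (hch.1 x hx)
    · -- equal counts, j > c: keep c, insert into tail
      refine List.pairwise_cons.mpr ⟨?_, ih hch.2 (fun x hx => hne x (by simp [hx]))⟩
      intro x hx
      rcases mem_ins.mp hx with rfl | hx
      · rcases hRcase with hjc | hcj'
        · exact absurd hjc (by
            rintro (hh | ⟨hh, hh'⟩)
            · exact absurd hh h1
            · exact absurd hh' (not_lt_of_gt h3))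
        · exact hcj'
      · exact hch.1 x hx
    · -- equal counts, ¬ j > c: insert in front
      have hjc : R oc j c := hbefore (Or.inr ⟨h2, h3⟩)
      refine List.pairwise_cons.mpr ⟨?_, hp⟩
      rintro x hx
      rcases List.mem_cons.mp hx with rfl | hx
      · exact hjc
      · exact R_trans hjc (hch.1 x hx)
    · -- fewer occurrences: keep c, insert into tail
      have hcj' : R oc c j := by
        rcases hRcase with hjc | hcj'
        · exact absurd hjc (by
            rintro (hh | ⟨hh, hh'⟩)
            · exact absurd hh h1
            · exact absurd hh h2)
        · exact hcj'
      refine List.pairwise_cons.mpr ⟨?_, ih hch.2 (fun x hx => hne x (by simp [hx]))⟩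
      intro x hx
      rcases mem_ins.mp hx with rfl | hx
      · exact hcj'
      · exact hch.1 x hx

lemma aInner_eq_ins (oc : PySem.Dict Char Int) (j : Char) :
    ∀ n ctrl k, ctrl.length - k = n → k ≤ ctrl.length → ctrl.length < oc.size →
      aInner oc j ctrl k = ctrl.take k ++ ins oc j (ctrl.drop k) := by
  intro n
  induction n with
  | zero =>
    intro ctrl k hn hk hs
    have hkl : k = ctrl.length := le_antisymm hk (by omega)
    unfold aInner
    rw [dif_pos (by omega)]
    subst hkl
    by_cases h0 : ctrl.length = 0
    · simp [List.eq_nil_of_length_eq_zero h0, ins]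
    · simp [h0, ins, List.take_length, List.drop_length]
  | succ n ih =>
    intro ctrl k hn hk hs
    have hklt : k < ctrl.length := by omega
    unfold aInner
    rw [dif_pos (by omega)]
    have h0 : ¬ ctrl.length = 0 := by omega
    have hne : ¬ k = ctrl.length := by omega
    rw [if_neg h0, if_neg hne]
    have hget : ctrl[k]? = some (ctrl.get ⟨k, hklt⟩) := List.getElem?_eq_getElem hklt
    set c := ctrl.get ⟨k, hklt⟩ with hc
    have hdrop : ctrl.drop k = c :: ctrl.drop (k + 1) := by
      rw [List.drop_eq_getElem_cons hklt]; rfl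
    have htake : ctrl.take (k + 1) = ctrl.take k ++ [c] := by
      rw [List.take_add_one, List.getElem?_eq_getElem hklt]; rfl
    rw [hget]
    simp only []
    by_cases h1 : oc.getD j 0 > oc.getD c 0
    · rw [if_pos h1, hdrop]
      simp [ins, h1]
    · rw [if_neg h1]
      by_cases h2 : oc.getD j 0 = oc.getD c 0
      · rw [if_pos h2]
        by_cases h3 : j > c
        · rw [if_pos h3, ih ctrl (k + 1) (by omega) (by omega) hs, htake, hdrop]
          simp [ins, h2, h3]
        · rw [if_neg h3]
          rw [hdrop]
          simp [ins, h2, h3]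
      · rw [if_neg h2, ih ctrl (k + 1) (by omega) (by omega) hs, htake, hdrop]
        simp [ins, h1, h2]

-- A's outer loop is the insertion-sort fold.
lemma aFold_eq_insFold (oc : PySem.Dict Char Int) :
    ∀ (l : List Char) (acc : List Char), acc.length + l.length ≤ oc.size →
      l.foldl (fun ctrl j => aInner oc j ctrl 0) acc = l.foldl (fun ctrl j => ins oc j ctrl) acc := by
  intro l
  induction l with
  | nil => intro acc _; rfl
  | cons j t ih =>
    intro acc hlen
    simp only [List.foldl_cons]
    rw [aInner_eq_ins oc j acc.length acc 0 (by omega) (by omega) (by simp at hlen; omega)]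
    simp only [List.take_zero, List.drop_zero, List.nil_append]
    exact ih (ins oc j acc) (by rw [length_ins]; simp at hlen ⊢; omega)

lemma insFold_perm (oc : PySem.Dict Char Int) :
    ∀ (l acc : List Char), (l.foldl (fun ctrl j => ins oc j ctrl) acc).Perm (l ++ acc) := by
  intro l
  induction l with
  | nil => intro acc; simp
  | cons j t ih =>
    intro acc
    simp only [List.foldl_cons]
    refine (ih (ins oc j acc)).trans ?_
    exact (List.Perm.append_left t (ins_perm oc j acc)).trans List.perm_middle

lemma insFold_pairwise (oc : PySem.Dict Char Int) :
    ∀ (l acc : List Char), acc.Pairwise (R oc) → (∀ c ∈ acc, c ∉ l) → l.Nodup →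
      (l.foldl (fun ctrl j => ins oc j ctrl) acc).Pairwise (R oc) := by
  intro l
  induction l with
  | nil => intro acc h _ _; exact h
  | cons j t ih =>
    intro acc hp hdisj hnd
    simp only [List.foldl_cons]
    have hnd' := List.nodup_cons.mp hnd
    refine ih (ins oc j acc) (ins_pairwise hp ?_) ?_ hnd'.2
    · intro c hc
      exact fun hcj => (hdisj c hc) (by simp [hcj])
    · intro c hc
      rcases mem_ins.mp hc with rfl | hc
      · exact hnd'.1
      · exact fun ht => (hdisj c hc) (by simp [ht])

-- uniqueness of the R-sorted arrangement
lemma R_sorted_unique {oc : PySem.Dict Char Int} {z1 z2 : List Char}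
    (hperm : z1.Perm z2) (h1 : z1.Pairwise (R oc)) (h2 : z2.Pairwise (R oc)) : z1 = z2 :=
  List.Perm.eq_of_pairwise (fun _ _ _ _ ha hb => absurd hb (fun hb => R_asymm ha hb)) h1 h2 hperm

-- ---------- B's selection picks the head of the R-sorted arrangement ----------

lemma bScan_spec (oc : PySem.Dict Char Int) :
    ∀ (rest : List Char) (best : Char),
      (bScan oc best rest = best ∨ bScan oc best rest ∈ rest)
      ∧ (∀ c ∈ rest, c ≠ bScan oc best rest → R oc (bScan oc best rest) c)
      ∧ (best ≠ bScan oc best rest → R oc (bScan oc best rest) best) := by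
  intro rest
  induction rest with
  | nil => intro best; exact ⟨Or.inl rfl, by simp, fun h => absurd rfl h⟩
  | cons c t ih =>
    intro best
    have hstep : bScan oc best (c :: t)
        = bScan oc (if oc.getD c 0 > oc.getD best 0 ∨ (oc.getD c 0 = oc.getD best 0 ∧ c < best) then c else best) t := rfl
    by_cases hcb : oc.getD c 0 > oc.getD best 0 ∨ (oc.getD c 0 = oc.getD best 0 ∧ c < best)
    · -- best replaced by c; note hcb is exactly R oc c best
      have hR : R oc c best := hcb
      rw [hstep, if_pos hcb]
      obtain ⟨hm, hall, hbest⟩ := ih c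
      set m := bScan oc c t with hmdef
      refine ⟨?_, ?_, ?_⟩
      · rcases hm with h | h
        · exact Or.inr (by simp [h])
        · exact Or.inr (by simp [h])
      · intro x hx hxm
        rcases List.mem_cons.mp hx with rfl | hx
        · exact hbest hxm
        · exact hall x hx hxm
      · intro hbm
        by_cases hcm : c = m
        · exact hcm ▸ hR
        · exact R_trans (hbest hcm) hR
    · rw [hstep, if_neg hcb]
      obtain ⟨hm, hall, hbest⟩ := ih best
      set m := bScan oc best t with hmdef
      refine ⟨?_, ?_, ?_⟩
      · rcases hm with h | h
        · exact Or.inl h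
        · exact Or.inr (by simp [h])
      · intro x hx hxm
        rcases List.mem_cons.mp hx with hxc | hx
        · -- x is the scanned element c; the kept best still beats it
          by_cases hcbeq : c = best
          · rw [hxc, hcbeq]
            refine hbest ?_
            intro he
            exact hxm (by rw [hxc, hcbeq, he])
          · have hRbc : R oc best c := by
              rcases R_total (oc := oc) hcbeq with h | h
              · exact absurd h hcb
              · exact h
            rw [hxc]
            by_cases hbm : best = m
            · exact hbm ▸ hRbc
            · exact R_trans (hbest hbm) hRbc
        · exact hall x hx hxm
      · exact hbest

lemma bSel_eq_take (oc : PySem.Dict Char Int) :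
    ∀ (n : Nat) (l : List Char), l.Nodup →
      bSel oc l n = (l.foldl (fun ctrl j => ins oc j ctrl) []).take n := by
  intro n
  induction n with
  | zero => intro l _; simp [bSel]
  | succ n ih =>
    intro l hnd
    match l with
    | [] => simp [bSel]
    | b :: rest =>
      obtain ⟨hm, hall, _⟩ := bScan_spec oc rest b
      set m := bScan oc b rest with hmdef
      have hmem : m ∈ b :: rest := by
        rcases hm with h | h
        · simp [h]
        · simp [h]
      have hminR : ∀ c ∈ b :: rest, c ≠ m → R oc m c := by
        intro c hc hcm
        rcases List.mem_cons.mp hc with rfl | hc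
        · rcases hm with h | h
          · exact absurd h.symm hcm
          · obtain ⟨_, _, hbest⟩ := bScan_spec oc rest c
            exact hbest hcm
        · exact hall c hc hcm
      -- the sorted arrangement of l = b :: rest
      set σ := ((b :: rest).foldl (fun ctrl j => ins oc j ctrl) []) with hσ
      have hσperm : σ.Perm (b :: rest) := by
        simpa using insFold_perm oc (b :: rest) []
      have hσpw : σ.Pairwise (R oc) := insFold_pairwise oc (b :: rest) [] (by simp) (by simp) hnd
      have hnde : ((b :: rest).erase m).Nodup := hnd.erase m
      set τ := (((b :: rest).erase m).foldl (fun ctrl j => ins oc j ctrl) []) with hτ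
      have hτperm : τ.Perm ((b :: rest).erase m) := by
        simpa using insFold_perm oc ((b :: rest).erase m) []
      have hτpw : τ.Pairwise (R oc) := insFold_pairwise oc ((b :: rest).erase m) [] (by simp) (by simp) hnde
      -- m :: τ is an R-sorted permutation of l, hence equals σ
      have hkey : σ = m :: τ := by
        apply R_sorted_unique (oc := oc) ?_ hσpw ?_
        · exact hσperm.trans ((List.perm_cons_erase hmem).trans (List.Perm.cons m hτperm.symm))
        · refine List.pairwise_cons.mpr ⟨?_, hτpw⟩
          intro c hc
          have hce : c ∈ (b :: rest).erase m := hτperm.mem_iff.mp hc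
          have := (hnd.mem_erase_iff).mp hce
          exact hminR c this.2 this.1
      show m :: bSel oc ((b :: rest).erase m) n = σ.take (n + 1)
      rw [ih _ hnde, hkey, List.take_succ_cons]

-- ---------- assembling the verdict ----------

lemma ctrl_eq (s1 : String) :
    bSel (bCount s1) (bCount s1).keys 5
      = ((aCount s1).keys.foldl (fun ctrl j => aInner (aCount s1) j ctrl 0) []).take 5 := by
  rw [aCount_eq_bCount]
  rw [aFold_eq_insFold (bCount s1) (bCount s1).keys []
        (by simp [PySem.Dict.keys, PySem.Dict.size])]
  exact bSel_eq_take (bCount s1) 5 (bCount s1).keys (nodup_keys_bCount s1)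

-- ===== VERDICT (by name: the statement is the Claim_ definition above) =====
theorem validar_cifra_spec : Claim_equal_validar_cifra := by
  intro s1 s2 _
  show validar_cifra s1 s2 = validar_cifra_alt s1 s2
  simp only [validar_cifra, validar_cifra_alt]
  rw [ctrl_eq s1]
  split_ifs with h
  · exact h.symm
  · exact (Bool.not_eq_true _).mp h |>.symm
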